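-- pv_equiv track=rewrite | github.com/markqvist/lc | lc/editor.py | _wrap_line_at_words
-- ===== SOURCE A (Python) =====
-- def _wrap_line_at_words(line: str, avail_width: int) -> list[tuple[int, str]]:
--     # Word-wrap a line at available width.
--     if not line: return [(0, "")]
--
--     segments = []
--     start = 0
--     line_len = len(line)
--
--     while start < line_len:
--         # Calculate end position for this segment
--         end = start + avail_width
--
--         if end >= line_len:
--             # Remaining text fits, use it all
--             segments.append((start, line[start:]))
--             break
--
--         # Look for last space in the segment [start:end]
--         # We want to find a space such that everything after it goes to next line
--         search_pos = end - 1  # Last character that could fit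
--         break_pos = -1        # Position of space where we should break (exclusive)
--
--         while search_pos >= start:
--             if line[search_pos] == ' ':
--                 break_pos = search_pos
--                 break
--             search_pos -= 1
--
--         if break_pos == -1:
--             # No space found - word is longer than line width
--             # Force-break at avail_width
--             segments.append((start, line[start:end]))
--             start = end
--
--         else:
--             # Found a space - wrap before it (don't include trailing spaces)
--             segments.append((start, line[start:break_pos]))
--             # Skip any spaces for the next segment
--             start = break_pos + 1
--             while start < line_len and line[start] == ' ': start += 1
--
--     return segments
-- ===== SOURCE B (Python) =====
-- def _wrap_line_at_words(line: str, avail_width: int) -> list[tuple[int, str]]: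
--     # Word-wrap: precompute sorted space positions once, binary-search the
--     # rightmost space in each window instead of scanning backwards per segment.
--     if not line:
--         return [(0, "")]
--     n = len(line)
--     spaces = [i for i, ch in enumerate(line) if ch == ' ']
--
--     def bisect_left(a, x):
--         lo, hi = 0, len(a)
--         while lo < hi:
--             mid = (lo + hi) // 2
--             if a[mid] < x:
--                 lo = mid + 1
--             else:
--                 hi = mid
--         return lo
--
--     segments = []
--     start = 0
--     while start < n:
--         end = start + avail_width
--         if end >= n:
--             segments.append((start, line[start:]))
--             break
--         idx = bisect_left(spaces, end)
--         if idx > 0 and spaces[idx - 1] >= start: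
--             bp = spaces[idx - 1]
--             segments.append((start, line[start:bp]))
--             start = bp + 1
--             while start < n and line[start] == ' ':
--                 start += 1
--         else:
--             segments.append((start, line[start:end]))
--             start = end
--     return segments
-- ===== Notes on version B (the rewrite author's own statement) =====
-- stated objective: alternative
-- what changed: A re-scans each window backwards character by character to find the break space; B precomputes the sorted list of space positions once and finds the rightmost space below each window end with a binary search, so no per-window backward character scan remains.
import Mathlib
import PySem

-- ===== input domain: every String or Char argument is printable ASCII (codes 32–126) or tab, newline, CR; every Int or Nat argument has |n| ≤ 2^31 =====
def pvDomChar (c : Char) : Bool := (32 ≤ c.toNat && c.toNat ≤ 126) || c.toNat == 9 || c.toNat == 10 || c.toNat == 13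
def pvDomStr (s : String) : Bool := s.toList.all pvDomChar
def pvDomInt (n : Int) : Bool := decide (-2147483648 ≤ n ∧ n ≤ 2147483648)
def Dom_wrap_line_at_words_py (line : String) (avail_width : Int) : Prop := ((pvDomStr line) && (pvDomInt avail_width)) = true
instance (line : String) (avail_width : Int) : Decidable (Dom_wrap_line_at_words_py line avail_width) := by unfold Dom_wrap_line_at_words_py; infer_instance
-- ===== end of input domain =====

-- B replaces A's per-window backward character scan for the break point by one precomputed
-- sorted list of space positions queried with binary search; return values agree on Pre_.
-- Both Pythons loop forever when avail_width ≤ 0 and the line is nonempty (excluded by Pre_).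

-- shared helper: the trailing-space skip loop `while start < line_len and line[start] == ' ': start += 1`,
-- identical in A and B; fuel = line_len - start, exact on every reached state
def pySkipSpaces (cs : List Char) : Nat → Int → Int
  | 0, s => s
  | f+1, s =>
    if s < (cs.length : Int) then
      if (PySem.List.pyGet? cs s).getD '?' = ' ' then pySkipSpaces cs f (s + 1) else s
    else s

-- ===== PORT A =====
-- inner loop `while search_pos >= start: …`, fuel = search_pos - start + 1 (exact: indices stay in range in A's calls)
def pyFindSpaceBack (cs : List Char) : Nat → Int → Int
  | 0, _ => -1
  | f+1, pos =>
    if (PySem.List.pyGet? cs pos).getD '?' = ' ' then pos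
    else pyFindSpaceBack cs f (pos - 1)

-- outer `while start < line_len`, fuel = line_len (start grows by ≥ 1 per iteration whenever avail_width ≥ 1)
def wrapWordsGoA (cs : List Char) (aw : Int) : Nat → Int → List (Int × String)
  | 0, _ => []
  | f+1, start =>
    if start < (cs.length : Int) then
      let e := start + aw
      if (cs.length : Int) ≤ e then
        [(start, String.ofList (PySem.List.slice cs (some start) none))]
      else
        let bp := pyFindSpaceBack cs (e - start).toNat (e - 1)
        if bp = -1 then
          (start, String.ofList (PySem.List.slice cs (some start) (some e))) :: wrapWordsGoA cs aw f e
        else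
          (start, String.ofList (PySem.List.slice cs (some start) (some bp))) ::
            wrapWordsGoA cs aw f (pySkipSpaces cs ((cs.length : Int) - (bp + 1)).toNat (bp + 1))
    else []

def wrap_line_at_words_py (line : String) (avail_width : Int) : List (Int × String) :=
  let cs := line.toList
  if cs.isEmpty then [(0, "")]
  else wrapWordsGoA cs avail_width cs.length 0

-- ===== PORT B =====
-- `spaces = [i for i, ch in enumerate(line) if ch == ' ']`
def wrapSpacesIdx (cs : List Char) : List Int :=
  ((PySem.List.enumerate cs 0).filter (fun p => p.2 == ' ')).map Prod.fst

-- outer loop of B: rightmost space below `end` found via bisect_left on the precomputed positions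
def wrapWordsGoB (cs : List Char) (spaces : List Int) (aw : Int) : Nat → Int → List (Int × String)
  | 0, _ => []
  | f+1, start =>
    if start < (cs.length : Int) then
      let e := start + aw
      if (cs.length : Int) ≤ e then
        [(start, String.ofList (PySem.List.slice cs (some start) none))]
      else
        let idx := PySem.List.bisectLeft spaces e
        if 0 < idx ∧ start ≤ (spaces[idx-1]?).getD 0 then
          let bp := (spaces[idx-1]?).getD 0
          (start, String.ofList (PySem.List.slice cs (some start) (some bp))) ::
            wrapWordsGoB cs spaces aw f (pySkipSpaces cs ((cs.length : Int) - (bp + 1)).toNat (bp + 1))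
        else
          (start, String.ofList (PySem.List.slice cs (some start) (some e))) :: wrapWordsGoB cs spaces aw f e
    else []

def wrap_line_at_words_py_alt (line : String) (avail_width : Int) : List (Int × String) :=
  let cs := line.toList
  if cs.isEmpty then [(0, "")]
  else wrapWordsGoB cs (wrapSpacesIdx cs) avail_width cs.length 0

-- ===== PRECONDITION & SPEC =====
-- Pre_ excludes avail_width ≤ 0 with a nonempty line: there BOTH Pythons loop forever (never return).
def Pre_wrap_line_at_words_py (line : String) (avail_width : Int) : Prop :=
  line = "" ∨ 1 ≤ avail_width
instance (line : String) (avail_width : Int) : Decidable (Pre_wrap_line_at_words_py line avail_width) := by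
  unfold Pre_wrap_line_at_words_py; infer_instance

def pvWitness_wrap_line_at_words_py : String × Int := ("hello world, wrap me", 7)

def Spec_wrap_line_at_words_py (line : String) (avail_width : Int) (out : List (Int × String)) : Prop := out = wrap_line_at_words_py_alt line avail_width
instance (line : String) (avail_width : Int) (out : List (Int × String)) : Decidable (Spec_wrap_line_at_words_py line avail_width out) := by unfold Spec_wrap_line_at_words_py; infer_instance

-- ===== CLAIM (what is proved, stated in full; the proofs are below) =====
def Claim_equal_wrap_line_at_words_py : Prop := ∀ (line : String) (avail_width : Int), Dom_wrap_line_at_words_py line avail_width → Pre_wrap_line_at_words_py line avail_width → Spec_wrap_line_at_words_py line avail_width (wrap_line_at_words_py line avail_width)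

-- ===== LEMMAS AND PROOFS =====

-- A's backward scan: either no space in (pos - f, pos], or the result is the largest space position there
lemma pyFindSpaceBack_spec (cs : List Char) (f : Nat) (pos : Int) :
    (pyFindSpaceBack cs f pos = -1 ∧
      ∀ i : Int, pos - f < i → i ≤ pos → (PySem.List.pyGet? cs i).getD '?' ≠ ' ')
  ∨ (pos - f < pyFindSpaceBack cs f pos ∧ pyFindSpaceBack cs f pos ≤ pos ∧
      (PySem.List.pyGet? cs (pyFindSpaceBack cs f pos)).getD '?' = ' ' ∧
      ∀ i : Int, pyFindSpaceBack cs f pos < i → i ≤ pos → (PySem.List.pyGet? cs i).getD '?' ≠ ' ') := by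
  induction f generalizing pos with
  | zero => exact Or.inl ⟨rfl, fun i h1 h2 => absurd (lt_of_lt_of_le (by simpa using h1) h2) (lt_irrefl _)⟩
  | succ f ih =>
    have hdef : pyFindSpaceBack cs (f+1) pos =
        (if (PySem.List.pyGet? cs pos).getD '?' = ' ' then pos else pyFindSpaceBack cs f (pos - 1)) := rfl
    by_cases hc : (PySem.List.pyGet? cs pos).getD '?' = ' '
    · rw [hdef, if_pos hc]
      refine Or.inr ⟨by push_cast; omega, le_refl _, hc, fun i h1 h2 => absurd (lt_of_lt_of_le h1 h2) (lt_irrefl _)⟩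
    · rw [hdef, if_neg hc]
      rcases ih (pos - 1) with ⟨h1, h2⟩ | ⟨h1, h2, h3, h4⟩
      · refine Or.inl ⟨h1, fun i hi1 hi2 => ?_⟩
        rcases eq_or_lt_of_le hi2 with rfl | hlt
        · exact hc
        · exact h2 i (by push_cast at hi1 ⊢; omega) (by omega)
      · refine Or.inr ⟨by push_cast at h1 ⊢; omega, by omega, h3, fun i hi1 hi2 => ?_⟩
        rcases eq_or_lt_of_le hi2 with rfl | hlt
        · exact hc
        · exact h4 i hi1 (by omega)

lemma mem_wrapSpacesIdx (cs : List Char) (i : Int) :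
    i ∈ wrapSpacesIdx cs ↔ ∃ (k : Nat) (h : k < cs.length), i = (k : Int) ∧ cs[k] = ' ' := by
  simp only [wrapSpacesIdx, List.mem_map, List.mem_filter, PySem.List.mem_enumerate_iff]
  constructor
  · rintro ⟨p, ⟨⟨k, hk, rfl⟩, hsp⟩, rfl⟩
    simp only [beq_iff_eq] at hsp
    exact ⟨k, hk, by simp, by simpa using hsp⟩
  · rintro ⟨k, hk, rfl, hsp⟩
    exact ⟨((0:Int) + k, cs[k]), ⟨⟨k, hk, rfl⟩, by simpa using hsp⟩, by simp⟩

lemma wrapSpacesIdx_pairwise (cs : List Char) : (wrapSpacesIdx cs).Pairwise (· < ·) := by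
  have h := PySem.List.pairwise_lt_enumerate (xs := cs) (s := 0)
  unfold wrapSpacesIdx
  refine (List.pairwise_map).2 ?_
  exact List.Pairwise.sublist List.filter_sublist h

lemma le_pySkipSpaces (cs : List Char) (f : Nat) (s : Int) : s ≤ pySkipSpaces cs f s := by
  induction f generalizing s with
  | zero => exact le_refl _
  | succ f ih =>
    simp only [pySkipSpaces]
    split_ifs with h1 h2
    · exact le_trans (by omega) (ih (s+1))
    · exact le_refl _
    · exact le_refl _

-- the two break-point computations coincide on a window [start, e) with 0 ≤ start < e < len
lemma break_step_eq (cs : List Char) (start e : Int) (h0 : 0 ≤ start) (hse : start < e)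
    (hen : e < (cs.length : Int)) :
    let bp := pyFindSpaceBack cs (e - start).toNat (e - 1)
    let spaces := wrapSpacesIdx cs
    let idx := PySem.List.bisectLeft spaces e
    ((0 < idx ∧ start ≤ (spaces[idx-1]?).getD 0) ↔ bp ≠ -1) ∧
    (bp ≠ -1 → (spaces[idx-1]?).getD 0 = bp) := by
  intro bp spaces idx
  have hpw := wrapSpacesIdx_pairwise cs
  have hspec := PySem.List.bisectLeft_spec spaces e (hpw.imp (fun h => le_of_lt h))
  obtain ⟨hlen, hlt, hge⟩ := hspec
  have hfb := pyFindSpaceBack_spec cs (e - start).toNat (e - 1)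
  have hcast : ((e - start).toNat : Int) = e - start := Int.toNat_of_nonneg (by omega)
  -- a space position in [start, e) as seen by the char probe, as list membership
  have hmemchar : ∀ j : Nat, j < cs.length → ((j : Int) < e) →
      ((PySem.List.pyGet? cs (j : Int)).getD '?' = ' ' ↔ (j : Int) ∈ spaces) := by
    intro j hj _
    rw [mem_wrapSpacesIdx]
    rw [PySem.List.pyGet?_natCast, List.getElem?_eq_getElem hj]
    constructor
    · intro h; exact ⟨j, hj, rfl, by simpa using h⟩
    · rintro ⟨k, hk, hkj, hsp⟩
      have : k = j := by exact_mod_cast hkj.symm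
      subst this; simpa using hsp
  rcases hfb with ⟨hbp, hnone⟩ | ⟨hgt, hle, hsp, hmax⟩
  · -- no space in [start, e): bisect condition must fail
    constructor
    · constructor
      · rintro ⟨hidx, hstart⟩
        exfalso
        have hm1 : idx - 1 < spaces.length := by omega
        have hv : (spaces[idx-1]?).getD 0 = spaces[idx-1] := by
          rw [List.getElem?_eq_getElem hm1]; rfl
        rw [hv] at hstart
        have hlt1 : spaces[idx-1] < e := hlt (idx-1) hm1 (by omega)
        have hmem : spaces[idx-1] ∈ spaces := List.getElem_mem hm1
        rw [mem_wrapSpacesIdx] at hmem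
        obtain ⟨k, hk, hkeq, hksp⟩ := hmem
        have : (PySem.List.pyGet? cs ((k:Int))).getD '?' = ' ' := by
          rw [PySem.List.pyGet?_natCast, List.getElem?_eq_getElem hk]; simpa using hksp
        exact hnone (k : Int) (by omega) (by omega) this
      · intro h; exact absurd hbp (by simpa using h)
    · intro h; exact absurd hbp (by simpa using h)
  · -- bp is the largest space position in [start, e)
    have hbpne : bp ≠ -1 := by omega
    have hbplt : bp < e := by omega
    have hbp0 : 0 ≤ bp := by omega
    -- bp ∈ spaces
    have hbpnat : bp = ((bp.toNat : Nat) : Int) := by omega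
    have hbpn : bp.toNat < cs.length := by omega
    have hbpmem : bp ∈ spaces := by
      have hsp' : (PySem.List.pyGet? cs ((bp.toNat : Nat) : Int)).getD '?' = ' ' := by
        rw [← hbpnat]; exact hsp
      have hm := (hmemchar bp.toNat hbpn (by omega)).1 hsp'
      rw [hbpnat]; exact hm
    -- so idx > 0 and spaces[idx-1] = bp
    obtain ⟨k, hk, hkeq⟩ := List.mem_iff_getElem.1 hbpmem
    have hkidx : k < idx := by
      by_contra hnk
      have := hge k hk (by omega)
      omega
    have hidxpos : 0 < idx := by omega
    have hm1 : idx - 1 < spaces.length := by omega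
    have hv : (spaces[idx-1]?).getD 0 = spaces[idx-1] := by
      rw [List.getElem?_eq_getElem hm1]; rfl
    have hle1 : spaces[k] ≤ spaces[idx-1] := by
      rcases Nat.lt_or_ge k (idx-1) with hlt2 | hge2
      · exact le_of_lt ((List.pairwise_iff_getElem.1 hpw) k (idx-1) hk hm1 hlt2)
      · have : k = idx - 1 := by omega
        subst this; exact le_refl _
    have hlt1 : spaces[idx-1] < e := hlt (idx-1) hm1 (by omega)
    -- spaces[idx-1] is a space position; it cannot exceed bp
    have hmem1 : spaces[idx-1] ∈ spaces := List.getElem_mem hm1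
    rw [mem_wrapSpacesIdx] at hmem1
    obtain ⟨k2, hk2, hk2eq, hk2sp⟩ := hmem1
    have hchar2 : (PySem.List.pyGet? cs ((k2:Int))).getD '?' = ' ' := by
      rw [PySem.List.pyGet?_natCast, List.getElem?_eq_getElem hk2]; simpa using hk2sp
    have heq : spaces[idx-1] = bp := by
      by_contra hne
      have hgt2 : bp < spaces[idx-1] := by omega
      exact hmax (k2 : Int) (by omega) (by omega) hchar2
    constructor
    · constructor
      · intro _; exact hbpne
      · intro _; exact ⟨hidxpos, by rw [hv, heq]; omega⟩
    · intro _; rw [hv, heq]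

lemma go_eq (cs : List Char) (aw : Int) (hw : 1 ≤ aw) :
    ∀ (f : Nat) (start : Int), 0 ≤ start →
      wrapWordsGoA cs aw f start = wrapWordsGoB cs (wrapSpacesIdx cs) aw f start := by
  intro f
  induction f with
  | zero => intro start _; rfl
  | succ f ih =>
    intro start h0
    simp only [wrapWordsGoA, wrapWordsGoB]
    by_cases h1 : start < (cs.length : Int)
    · rw [if_pos h1, if_pos h1]
      by_cases h2 : (cs.length : Int) ≤ start + aw
      · rw [if_pos h2, if_pos h2]
      · rw [if_neg h2, if_neg h2]
        obtain ⟨hiff, hval⟩ := break_step_eq cs start (start + aw) h0 (by omega) (by omega)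
        by_cases hbp : pyFindSpaceBack cs (start + aw - start).toNat (start + aw - 1) = -1
        · rw [if_pos hbp, if_neg (fun hc => (hiff.1 hc) hbp), ih (start + aw) (by omega)]
        · have hbpge : start ≤ pyFindSpaceBack cs (start + aw - start).toNat (start + aw - 1) := by
            rcases pyFindSpaceBack_spec cs (start + aw - start).toNat (start + aw - 1) with ⟨h, _⟩ | ⟨h, _, _, _⟩
            · exact absurd h hbp
            · omega
          rw [if_neg hbp, if_pos (hiff.2 hbp), hval hbp,
            ih _ (le_trans (by omega) (le_pySkipSpaces cs _ _))]
    · rw [if_neg h1, if_neg h1]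

-- ===== VERDICT (by name: the statement is the Claim_ definition above) =====
theorem wrap_line_at_words_py_spec : Claim_equal_wrap_line_at_words_py := by
  intro line aw _ hpre
  unfold Spec_wrap_line_at_words_py wrap_line_at_words_py wrap_line_at_words_py_alt
  by_cases he : line.toList.isEmpty
  · simp [he]
  · simp only [he, Bool.false_eq_true, if_false]
    have hw : 1 ≤ aw := by
      rcases hpre with hempty | hw
      · exfalso; apply he; rw [hempty]; rfl
      · exact hw
    exact go_eq line.toList aw hw line.toList.length 0 (le_refl 0)
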